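-- pv_equiv track=rewrite | github.com/h4nek/Honeypots-Setup | honeypots_setup_program/main_0.5.py | cmp_states
-- ===== SOURCE A (Python) =====
-- import copy
--
-- def cmp_lists(l1, l2):
--     return sorted(l1) == sorted(l2)
--
-- def cmp_states(state1, state2):
--     state2_rest = copy.deepcopy(state2) # we don't want to match one interface in the second state to several in the first state
--     for iface in state1:
--         ifaces_equal = False
--         for iface2 in state2_rest:
--             if cmp_lists(iface, iface2):
--                 ifaces_equal = True
--                 state2_rest.remove(iface2)
--                 break;
--         if not ifaces_equal:
--             return False
--     return True
-- ===== SOURCE B (Python) =====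
-- def cmp_states(state1, state2):
--     c1 = [tuple(sorted(i)) for i in state1]
--     c2 = [tuple(sorted(i)) for i in state2]
--     return all(c1.count(x) <= c2.count(x) for x in c1)
-- ===== Notes on version B (the rewrite author's own statement) =====
-- stated objective: simpler
-- what changed: Replaces the deepcopy plus greedy scan-and-remove matching loop with canonicalizing every interface to its sorted form and one multiset-containment test by counting.
import Mathlib
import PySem

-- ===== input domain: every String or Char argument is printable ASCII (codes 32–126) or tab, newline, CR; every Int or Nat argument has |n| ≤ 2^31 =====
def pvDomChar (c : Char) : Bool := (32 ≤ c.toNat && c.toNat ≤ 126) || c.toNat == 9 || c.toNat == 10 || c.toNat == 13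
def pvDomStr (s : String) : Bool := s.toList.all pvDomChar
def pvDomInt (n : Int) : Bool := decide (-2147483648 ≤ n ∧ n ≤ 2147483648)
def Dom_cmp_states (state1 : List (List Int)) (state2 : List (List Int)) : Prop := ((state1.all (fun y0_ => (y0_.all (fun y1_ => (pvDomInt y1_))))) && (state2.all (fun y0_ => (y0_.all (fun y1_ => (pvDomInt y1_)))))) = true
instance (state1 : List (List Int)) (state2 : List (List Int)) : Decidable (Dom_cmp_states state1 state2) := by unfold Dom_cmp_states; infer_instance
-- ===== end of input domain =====

-- B replaces A's deepcopy + greedy scan-and-remove matching with a counting multiset-containment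
-- test over sorted interfaces (objective: simpler; return value only — A never mutates its arguments).

-- ===== PORT A =====
def cmp_lists (l1 : List Int) (l2 : List Int) : Bool :=
  PySem.List.sorted l1 (fun x => x) false == PySem.List.sorted l2 (fun x => x) false

-- the outer for-loop of A: state2_rest is the mutable copy; the inner loop finds the first
-- matching iface2, removes it (list.remove = first ==-equal element) and breaks
def cmpStatesLoop : List (List Int) → List (List Int) → Bool
  | [], _ => true
  | iface :: t, state2_rest =>
    match state2_rest.find? (fun iface2 => cmp_lists iface iface2) with
    | none => false
    | some iface2 => cmpStatesLoop t ((PySem.List.remove? state2_rest iface2).getD state2_rest)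

def cmp_states (state1 : List (List Int)) (state2 : List (List Int)) : Bool :=
  cmpStatesLoop state1 state2

-- ===== PORT B =====
def cmp_states_alt (state1 : List (List Int)) (state2 : List (List Int)) : Bool :=
  let c1 := state1.map (fun i => PySem.List.sorted i (fun x => x) false)
  let c2 := state2.map (fun i => PySem.List.sorted i (fun x => x) false)
  c1.all (fun x => decide (PySem.List.count c1 x ≤ PySem.List.count c2 x))

-- ===== PRECONDITION & SPEC =====
def Spec_cmp_states (state1 : List (List Int)) (state2 : List (List Int)) (out : Bool) : Prop := out = cmp_states_alt state1 state2
instance (state1 : List (List Int)) (state2 : List (List Int)) (out : Bool) : Decidable (Spec_cmp_states state1 state2 out) := by unfold Spec_cmp_states; infer_instance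

-- ===== CLAIM (what is proved, stated in full; the proofs are below) =====
def Claim_equal_cmp_states : Prop := ∀ (state1 : List (List Int)) (state2 : List (List Int)), Dom_cmp_states state1 state2 → Spec_cmp_states state1 state2 (cmp_states state1 state2)

-- ===== LEMMAS AND PROOFS =====

-- the canonical form of an interface: its sorted element list
def canonIf (i : List Int) : List Int := PySem.List.sorted i (fun x => x) false

theorem cmp_lists_iff (l1 l2 : List Int) : cmp_lists l1 l2 = true ↔ canonIf l1 = canonIf l2 := by
  unfold cmp_lists canonIf
  exact beq_iff_eq

-- removing one ==-equal copy of a ∈ l removes exactly one occurrence of canon a from the canon multiset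
theorem count_map_canon_erase (l : List (List Int)) (a : List Int) (ha : a ∈ l) (c : List Int) :
    (l.map canonIf).count c = ((l.erase a).map canonIf).count c + (if canonIf a = c then 1 else 0) := by
  have hp : (l.map canonIf).Perm (canonIf a :: (l.erase a).map canonIf) :=
    (List.perm_cons_erase ha).map canonIf
  rw [hp.count_eq, List.count_cons]
  simp only [beq_iff_eq]

theorem count_map_canon_cons (iface : List Int) (t : List (List Int)) (c : List Int) :
    ((iface :: t).map canonIf).count c
      = (t.map canonIf).count c + (if canonIf iface = c then 1 else 0) := by
  rw [List.map_cons, List.count_cons]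
  simp only [beq_iff_eq]

-- A's loop succeeds exactly when state1's canon multiset is contained in the rest's
theorem cmpStatesLoop_iff (s1 : List (List Int)) : ∀ (rest : List (List Int)),
    cmpStatesLoop s1 rest = true ↔
      ∀ c, (s1.map canonIf).count c ≤ (rest.map canonIf).count c := by
  induction s1 with
  | nil => intro rest; simp [cmpStatesLoop]
  | cons iface t ih =>
    intro rest
    rw [cmpStatesLoop]
    cases hfind : rest.find? (fun iface2 => cmp_lists iface iface2) with
    | none =>
      simp only [Bool.false_eq_true, false_iff, not_forall]
      refine ⟨canonIf iface, ?_⟩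
      have hnot : canonIf iface ∉ rest.map canonIf := by
        intro hmem
        rcases List.mem_map.mp hmem with ⟨y, hy, hcy⟩
        have := List.find?_eq_none.mp hfind y hy
        exact this ((cmp_lists_iff iface y).mpr hcy.symm)
      have h0 : (rest.map canonIf).count (canonIf iface) = 0 := List.count_eq_zero.mpr hnot
      have h1 := count_map_canon_cons iface t (canonIf iface)
      rw [if_pos rfl] at h1
      omega
    | some iface2 =>
      have hmem : iface2 ∈ rest := List.mem_of_find?_eq_some hfind
      have hpred : cmp_lists iface iface2 = true := List.find?_some hfind
      have hcan : canonIf iface = canonIf iface2 := (cmp_lists_iff iface iface2).mp hpred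
      simp only [PySem.List.remove?_eq_some_erase rest iface2 hmem, Option.getD_some]
      rw [ih (rest.erase iface2)]
      have key : ∀ c, ((iface :: t).map canonIf).count c ≤ (rest.map canonIf).count c ↔
          (t.map canonIf).count c ≤ ((rest.erase iface2).map canonIf).count c := by
        intro c
        have h2 := count_map_canon_erase rest iface2 hmem c
        have h3 := count_map_canon_cons iface t c
        rw [← hcan] at h2
        by_cases hc : canonIf iface = c
        · rw [if_pos hc] at h2 h3; omega
        · rw [if_neg hc] at h2 h3; omega
      constructor
      · intro h c; exact (key c).mpr (h c)
      · intro h c; exact (key c).mp (h c)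

-- B succeeds exactly under the same multiset-containment condition
theorem cmp_states_alt_iff (s1 s2 : List (List Int)) :
    cmp_states_alt s1 s2 = true ↔
      ∀ c, (s1.map canonIf).count c ≤ (s2.map canonIf).count c := by
  simp only [cmp_states_alt, List.all_eq_true, decide_eq_true_eq, PySem.List.count_eq]
  constructor
  · intro h c
    by_cases hc : c ∈ s1.map (fun i => PySem.List.sorted i (fun x => x) false)
    · exact h c hc
    · have h0 : (s1.map (fun i => PySem.List.sorted i (fun x => x) false)).count c = 0 :=
        List.count_eq_zero.mpr hc
      unfold canonIf
      omega
  · intro h x _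
    exact h x

-- ===== VERDICT (by name: the statement is the Claim_ definition above) =====
theorem cmp_states_spec : Claim_equal_cmp_states := by
  intro s1 s2 _
  unfold Spec_cmp_states cmp_states
  rw [Bool.eq_iff_iff, cmpStatesLoop_iff, cmp_states_alt_iff]
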